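-- pv_equiv track=rewrite | github.com/Grupo-de-simulacion-con-automatas/CAsimulations | CAsimulation/Models.py | __CountNeighborsByState
-- ===== SOURCE A (Python) =====
-- import enum
--
-- class State(enum.Enum):
--     H = -1  # Huecos
--     S = 0   # Susceptibles
--     I = 1   # Infectados
--     R = 2   # Recuperados
--     D = 3   # Espacio vacío que se puede ocupar por una nueva célula
--
-- def __CountNeighborsByState(neighbors):
--     """Cantidad de individuos por estado"""
--     numberOfSByImpact = 0; numberOfIByImpact = 0; numberOfRByImpact = 0; numberOfDByImpact = 0; numberOfH = 0
--     for n in neighbors: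
--         if n[0] == State.S.value: numberOfSByImpact += 1
--         elif n[0] == State.I.value: numberOfIByImpact += 1
--         elif n[0] == State.R.value: numberOfRByImpact += 1
--         elif n[0] == State.D.value: numberOfDByImpact += 1
--         elif n[0] == State.H.value: numberOfH += 1
--     amountOfCells = numberOfSByImpact + numberOfIByImpact + numberOfRByImpact + numberOfDByImpact + numberOfH
--     return (numberOfSByImpact, numberOfIByImpact, amountOfCells, numberOfH)
-- ===== SOURCE B (Python) =====
-- import enum
--
-- class State(enum.Enum):
--     H = -1
--     S = 0
--     I = 1
--     R = 2
--     D = 3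
--
-- def __CountNeighborsByState(neighbors):
--     """Cantidad de individuos por estado"""
--     heads = [n[0] for n in neighbors]
--     S = heads.count(State.S.value)
--     I = heads.count(State.I.value)
--     R = heads.count(State.R.value)
--     D = heads.count(State.D.value)
--     H = heads.count(State.H.value)
--     return (S, I, S + I + R + D + H, H)
-- ===== Notes on version B (the rewrite author's own statement) =====
-- stated objective: idiomatic
-- what changed: Replaces the single accumulator loop with a five-way if/elif chain by staged passes: extract the heads once, then take one list.count per state and sum the five counts.
import Mathlib
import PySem

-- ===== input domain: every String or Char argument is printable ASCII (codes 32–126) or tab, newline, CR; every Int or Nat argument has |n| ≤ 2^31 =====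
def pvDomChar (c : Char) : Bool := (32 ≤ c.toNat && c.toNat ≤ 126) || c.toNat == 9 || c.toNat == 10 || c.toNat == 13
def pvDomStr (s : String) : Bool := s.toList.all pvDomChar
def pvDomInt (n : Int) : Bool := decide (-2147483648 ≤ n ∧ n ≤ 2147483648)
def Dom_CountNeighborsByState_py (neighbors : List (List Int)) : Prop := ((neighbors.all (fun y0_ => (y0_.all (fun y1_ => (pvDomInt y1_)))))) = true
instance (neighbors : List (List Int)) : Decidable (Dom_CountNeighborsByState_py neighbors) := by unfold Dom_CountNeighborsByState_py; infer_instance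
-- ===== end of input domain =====

-- B replaces A's single loop with five accumulators and an if/elif chain by staged passes:
-- extract the heads once, then one list.count per state (objective: idiomatic; same O(n) cost).

-- ===== PORT A =====
-- the loop: five counters updated by an if/elif chain on n[0]
def CountNeighborsByState_py (neighbors : List (List Int)) : Int × Int × Int × Int :=
  let st := neighbors.foldl (fun (acc : Int × Int × Int × Int × Int) n =>
    let x := (PySem.List.pyGet? n 0).getD 0   -- n[0]; IndexError (none) excluded by Pre_
    let (s, i, r, d, h) := acc
    if x == 0 then (s + 1, i, r, d, h)
    else if x == 1 then (s, i + 1, r, d, h)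
    else if x == 2 then (s, i, r + 1, d, h)
    else if x == 3 then (s, i, r, d + 1, h)
    else if x == -1 then (s, i, r, d, h + 1)
    else (s, i, r, d, h)) (0, 0, 0, 0, 0)
  match st with
  | (s, i, r, d, h) => (s, i, s + i + r + d + h, h)

-- ===== PORT B =====
def CountNeighborsByState_py_alt (neighbors : List (List Int)) : Int × Int × Int × Int :=
  let heads := neighbors.map (fun n => (PySem.List.pyGet? n 0).getD 0)
  let s : Int := PySem.List.count heads 0
  let i : Int := PySem.List.count heads 1
  let r : Int := PySem.List.count heads 2
  let d : Int := PySem.List.count heads 3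
  let h : Int := PySem.List.count heads (-1)
  (s, i, s + i + r + d + h, h)

-- ===== PRECONDITION & SPEC =====
-- Pre_ excludes only inputs where A raises: n[0] is an IndexError on an empty row.
def Pre_CountNeighborsByState_py (neighbors : List (List Int)) : Prop :=
  ∀ n ∈ neighbors, n ≠ []
instance (neighbors : List (List Int)) : Decidable (Pre_CountNeighborsByState_py neighbors) := by
  unfold Pre_CountNeighborsByState_py; infer_instance

def pvWitness_CountNeighborsByState_py : List (List Int) := [[0, 7], [1], [-1], [5], [2, 2]]

def Spec_CountNeighborsByState_py (neighbors : List (List Int)) (out : Int × Int × Int × Int) : Prop := out = CountNeighborsByState_py_alt neighbors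
instance (neighbors : List (List Int)) (out : Int × Int × Int × Int) : Decidable (Spec_CountNeighborsByState_py neighbors out) := by unfold Spec_CountNeighborsByState_py; infer_instance

-- ===== CLAIM (what is proved, stated in full; the proofs are below) =====
def Claim_equal_CountNeighborsByState_py : Prop := ∀ (neighbors : List (List Int)), Dom_CountNeighborsByState_py neighbors → Pre_CountNeighborsByState_py neighbors → Spec_CountNeighborsByState_py neighbors (CountNeighborsByState_py neighbors)

-- ===== LEMMAS AND PROOFS =====

-- A's fold adds, to each starting accumulator component, the count of its key among the heads.
theorem pv_foldA (l : List (List Int)) (s i r d h : Int) :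
    l.foldl (fun (acc : Int × Int × Int × Int × Int) n =>
      if (PySem.List.pyGet? n 0).getD 0 = 0 then (acc.1 + 1, acc.2)
      else if (PySem.List.pyGet? n 0).getD 0 = 1 then (acc.1, acc.2.1 + 1, acc.2.2)
      else if (PySem.List.pyGet? n 0).getD 0 = 2 then (acc.1, acc.2.1, acc.2.2.1 + 1, acc.2.2.2)
      else if (PySem.List.pyGet? n 0).getD 0 = 3 then (acc.1, acc.2.1, acc.2.2.1, acc.2.2.2.1 + 1, acc.2.2.2.2)
      else if (PySem.List.pyGet? n 0).getD 0 = -1 then (acc.1, acc.2.1, acc.2.2.1, acc.2.2.2.1, acc.2.2.2.2 + 1)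
      else acc) (s, i, r, d, h)
    = (s + ((l.map (fun n => (PySem.List.pyGet? n 0).getD 0)).count 0 : Int),
       i + ((l.map (fun n => (PySem.List.pyGet? n 0).getD 0)).count 1 : Int),
       r + ((l.map (fun n => (PySem.List.pyGet? n 0).getD 0)).count 2 : Int),
       d + ((l.map (fun n => (PySem.List.pyGet? n 0).getD 0)).count 3 : Int),
       h + ((l.map (fun n => (PySem.List.pyGet? n 0).getD 0)).count (-1) : Int)) := by
  induction l generalizing s i r d h with
  | nil => simp
  | cons n t ih =>
    simp only [List.foldl_cons, List.map_cons, List.count_cons]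
    by_cases h0 : (PySem.List.pyGet? n 0).getD 0 = 0
    · simp only [h0]; norm_num [ih]; ring_nf
    · by_cases h1 : (PySem.List.pyGet? n 0).getD 0 = 1
      · simp only [h1]; norm_num [ih]; ring_nf
      · by_cases h2 : (PySem.List.pyGet? n 0).getD 0 = 2
        · simp only [h2]; norm_num [ih]; ring_nf
        · by_cases h3 : (PySem.List.pyGet? n 0).getD 0 = 3
          · simp only [h3]; norm_num [ih]; ring_nf
          · by_cases hm : (PySem.List.pyGet? n 0).getD 0 = -1
            · simp only [hm]; norm_num [ih]; ring_nf
            · rw [if_neg h0, if_neg h1, if_neg h2, if_neg h3, if_neg hm, ih]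
              simp
              exact ⟨h0, h1, h2, h3, hm⟩

-- ===== VERDICT (by name: the statement is the Claim_ definition above) =====
theorem CountNeighborsByState_py_spec : Claim_equal_CountNeighborsByState_py := by
  intro neighbors _ _
  unfold Spec_CountNeighborsByState_py CountNeighborsByState_py CountNeighborsByState_py_alt
  simp [PySem.List.count, pv_foldA]
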